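-- pv_equiv track=rewrite | github.com/Fetzi144/signal-market-terminal | backend/app/execution/polymarket_control_plane.py | _count_labels
-- ===== SOURCE A (Python) =====
-- def _count_labels(values: list[str | None]) -> dict[str, int]:
--     normalized = [
--         str(value).strip()
--         for value in values
--         if value not in (None, "")
--     ]
--     return {
--         label: sum(1 for value in normalized if value == label)
--         for label in sorted(set(normalized))
--     }
-- ===== SOURCE B (Python) =====
-- def _count_labels(values):
--     normalized = sorted(
--         str(value).strip()
--         for value in values
--         if value not in (None, "")
--     )
--     counts = {}
--     i = 0
--     n = len(normalized)
--     while i < n: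
--         label = normalized[i]
--         j = i + 1
--         while j < n and normalized[j] == label:
--             j += 1
--         counts[label] = j - i
--         i = j
--     return counts
-- ===== Notes on version B (the rewrite author's own statement) =====
-- stated objective: faster
-- what changed: Instead of rescanning the whole normalized list once per distinct label (and building a set first), B sorts the normalized list once and counts each run of equal adjacent labels in a single pass; sorted order of the runs matches A's sorted-set key order.
import Mathlib
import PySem

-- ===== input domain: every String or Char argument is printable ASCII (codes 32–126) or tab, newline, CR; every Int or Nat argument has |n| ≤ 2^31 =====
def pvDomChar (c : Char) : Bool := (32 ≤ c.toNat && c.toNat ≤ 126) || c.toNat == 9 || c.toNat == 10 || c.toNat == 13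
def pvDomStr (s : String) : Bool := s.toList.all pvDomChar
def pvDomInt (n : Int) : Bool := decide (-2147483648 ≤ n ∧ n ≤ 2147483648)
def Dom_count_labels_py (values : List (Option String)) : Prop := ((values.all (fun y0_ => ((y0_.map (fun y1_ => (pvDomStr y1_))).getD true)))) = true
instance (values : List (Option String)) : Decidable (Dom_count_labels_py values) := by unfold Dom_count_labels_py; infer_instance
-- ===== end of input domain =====

-- B sorts the normalized list once and counts runs of equal adjacent labels in one pass,
-- instead of A's per-label rescans of the whole list (objective: faster).

-- ===== PORT A =====
def count_labels_py (values : List (Option String)) : List (String × Int) :=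
  -- [str(value).strip() for value in values if value not in (None, "")]
  let normalized := (values.filter (fun value => !(value == none || value == some ""))).map
    (fun value => PySem.Str.strip (value.getD ""))   -- getD never used: none was filtered out
  (PySem.List.sorted (PySem.Set.ofList normalized) (fun x => x) false).map
    (fun label => (label, normalized.foldl (fun acc value => if value == label then acc + 1 else acc) (0 : Int)))

-- ===== PORT B =====
-- the run-counting while loop of Source B: take a run of elements equal to the head, emit its length, continue
def groupRuns : List String → List (String × Int)
  | [] => []
  | x :: xs =>
      (x, 1 + ((xs.takeWhile (fun y => y == x)).length : Int)) :: groupRuns (xs.dropWhile (fun y => y == x))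
  termination_by s => s.length
  decreasing_by
    simpa using Nat.lt_succ_of_le (List.length_dropWhile_le _ _)

def count_labels_py_alt (values : List (Option String)) : List (String × Int) :=
  -- normalized = sorted(str(value).strip() for value in values if value not in (None, ""))
  let normalized := PySem.List.sorted
    ((values.filter (fun value => !(value == none || value == some ""))).map
      (fun value => PySem.Str.strip (value.getD ""))) (fun x => x) false
  groupRuns normalized

-- ===== PRECONDITION & SPEC =====
def Spec_count_labels_py (values : List (Option String)) (out : List (String × Int)) : Prop := out = count_labels_py_alt values
instance (values : List (Option String)) (out : List (String × Int)) : Decidable (Spec_count_labels_py values out) := by unfold Spec_count_labels_py; infer_instance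

-- ===== CLAIM (what is proved, stated in full; the proofs are below) =====
def Claim_equal_count_labels_py : Prop := ∀ (values : List (Option String)), Dom_count_labels_py values → Spec_count_labels_py values (count_labels_py values)

-- ===== LEMMAS AND PROOFS =====

theorem gt_of_mem_dropWhile (x : String) (xs : List String)
    (hp : (x :: xs).Pairwise (· ≤ ·)) :
    ∀ y ∈ xs.dropWhile (fun y => y == x), x < y := by
  induction xs with
  | nil => simp
  | cons a tl ih =>
    intro y hy
    rcases List.pairwise_cons.mp hp with ⟨hx, htl⟩
    by_cases ha : a = x
    · subst ha
      simp only [List.dropWhile_cons, beq_self_eq_true] at hy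
      exact ih (List.pairwise_cons.mpr ⟨fun z hz => hx z (List.mem_cons_of_mem _ hz),
        (List.pairwise_cons.mp htl).2⟩) y hy
    · simp only [List.dropWhile_cons, beq_iff_eq, ha, if_false] at hy
      have hxa : x < a := lt_of_le_of_ne (hx a (List.mem_cons_self)) (fun h => ha h.symm)
      rcases List.mem_cons.mp hy with rfl | hy'
      · exact hxa
      · exact lt_of_lt_of_le hxa ((List.pairwise_cons.mp htl).1 y hy')

theorem groupRuns_sorted_aux (N : Nat) : ∀ (s : List String), s.length ≤ N → s.Pairwise (· ≤ ·) →
    groupRuns s =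
      (PySem.List.sorted (PySem.Set.ofList s) (fun x => x) false).map
        (fun x => (x, (s.count x : Int))) := by
  induction N with
  | zero =>
    intro s hl _
    have : s = [] := List.length_eq_zero_iff.mp (Nat.le_zero.mp hl)
    subst this
    simp [groupRuns, PySem.List.sorted_eq_nil_iff]
  | succ N ih =>
    intro s hl hs
    match s with
    | [] => simp [groupRuns, PySem.List.sorted_eq_nil_iff]
    | x :: xs =>
      set run := xs.takeWhile (fun y => y == x) with hrundef
      set rest := xs.dropWhile (fun y => y == x) with hrestdef
      have hsplit : run ++ rest = xs := List.takeWhile_append_dropWhile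
      have hrun : ∀ y ∈ run, y = x := by
        intro y hy
        simpa using List.mem_takeWhile_imp hy
      have hrest : ∀ y ∈ rest, x < y := gt_of_mem_dropWhile x xs hs
      have hxnotrest : x ∉ rest := fun h => lt_irrefl x (hrest x h)
      have hrestpw : rest.Pairwise (· ≤ ·) :=
        ((List.pairwise_cons.mp hs).2).sublist (List.dropWhile_sublist _)
      have hrl : rest.length ≤ N := by
        have h1 : rest.length ≤ xs.length := List.length_dropWhile_le _ _
        simp only [List.length_cons] at hl
        omega
      have hih := ih rest hrl hrestpw
      -- the sorted distinct labels of x :: xs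
      have hsortedeq : PySem.List.sorted (PySem.Set.ofList (x :: xs)) (fun x => x) false
          = x :: PySem.List.sorted (PySem.Set.ofList rest) (fun x => x) false := by
        apply PySem.List.sorted_eq_of_perm_of_pairwise_lt
        · refine (List.perm_ext_iff_of_nodup ?_ (PySem.Set.nodup_ofList _)).mpr ?_
          · refine List.nodup_cons.mpr ⟨?_, ?_⟩
            · intro h
              exact hxnotrest (by simpa [PySem.List.mem_sorted, PySem.Set.mem_ofList] using h)
            · exact (PySem.List.sorted_perm _ _ _).nodup_iff.mpr (PySem.Set.nodup_ofList _)
          · intro a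
            simp only [List.mem_cons, PySem.List.mem_sorted, PySem.Set.mem_ofList]
            constructor
            · rintro (rfl | ha)
              · left; rfl
              · right; rw [← hsplit]; exact List.mem_append.mpr (Or.inr ha)
            · rintro (rfl | ha)
              · left; rfl
              · rw [← hsplit] at ha
                rcases List.mem_append.mp ha with h | h
                · left; exact hrun a h
                · right; exact h
        · refine List.pairwise_cons.mpr ⟨?_, PySem.List.sorted_ofList_pairwise_lt _⟩
          intro y hy
          exact hrest y (by simpa [PySem.List.mem_sorted, PySem.Set.mem_ofList] using hy)
      have hcx : (x :: xs).count x = run.length + 1 := by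
        rw [List.count_cons_self, ← hsplit, List.count_append,
          List.count_eq_length.mpr (fun b hb => by simpa using (hrun b hb).symm),
          List.count_eq_zero.mpr hxnotrest]
      have hcy : ∀ y ∈ PySem.List.sorted (PySem.Set.ofList rest) (fun x => x) false,
          (x :: xs).count y = rest.count y := by
        intro y hy
        have hyr : y ∈ rest := by simpa [PySem.List.mem_sorted, PySem.Set.mem_ofList] using hy
        have hyx : y ≠ x := fun h => lt_irrefl x (h ▸ hrest y hyr)
        have hynr : y ∉ run := fun h => hyx (hrun y h)
        rw [List.count_cons_of_ne hyx.symm, ← hsplit, List.count_append,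
          List.count_eq_zero.mpr hynr]
        simp
      rw [groupRuns, hsortedeq, List.map_cons, hih]
      refine congrArg₂ _ ?_ ?_
      · have : ((x :: xs).count x : Int) = 1 + (run.length : Int) := by
          rw [hcx]; push_cast; ring
        rw [this]
      · exact (List.map_congr_left (fun y hy => by rw [hcy y hy])).symm

theorem groupRuns_sorted (s : List String) (hs : s.Pairwise (· ≤ ·)) :
    groupRuns s =
      (PySem.List.sorted (PySem.Set.ofList s) (fun x => x) false).map
        (fun x => (x, (s.count x : Int))) :=
  groupRuns_sorted_aux s.length s le_rfl hs

theorem countA_eq_count (n : List String) (label : String) :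
    n.foldl (fun acc value => if value == label then acc + 1 else acc) (0 : Int) = (n.count label : Int) := by
  rw [PySem.List.foldl_beq_add_one]; ring

theorem sorted_ofList_sorted (n : List String) :
    PySem.List.sorted (PySem.Set.ofList (PySem.List.sorted n (fun x => x) false)) (fun x => x) false
      = PySem.List.sorted (PySem.Set.ofList n) (fun x => x) false := by
  apply PySem.List.sorted_eq_sorted_of_perm _ _ _ (fun a b h => h)
  refine (List.perm_ext_iff_of_nodup (PySem.Set.nodup_ofList _) (PySem.Set.nodup_ofList _)).mpr ?_
  intro a
  simp [PySem.Set.mem_ofList, PySem.List.mem_sorted]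

-- ===== VERDICT (by name: the statement is the Claim_ definition above) =====
theorem count_labels_py_spec : Claim_equal_count_labels_py := by
  intro values _
  unfold Spec_count_labels_py count_labels_py count_labels_py_alt
  set n := (values.filter (fun value => !(value == none || value == some ""))).map
    (fun value => PySem.Str.strip (value.getD "")) with hn
  set s := PySem.List.sorted n (fun x => x) false with hsdef
  have hs : s.Pairwise (· ≤ ·) := PySem.List.sorted_pairwise n (fun x => x)
  rw [groupRuns_sorted s hs, sorted_ofList_sorted n]
  refine List.map_congr_left (fun x _ => ?_)
  rw [countA_eq_count]
  have : s.count x = n.count x := (PySem.List.sorted_perm n (fun x => x) false).count_eq x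
  simp [this]
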